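-- pv_equiv track=rewrite | github.com/elian204/sktr_for_long_traces | src/utils.py | find_longest_prefix
-- ===== SOURCE A (Python) =====
-- from typing import (
--     Any, Callable, Dict, Iterable, List, Optional, Sequence, Tuple, Union
-- )
--
-- def find_longest_prefix(
--     path_prefix_tuple: Tuple[str, ...],
--     prob_dict: Dict[Tuple[str, ...], Dict[str, float]]
-- ) -> Optional[Tuple[str, ...]]:
--     """
--     Find longest prefix that exists in dictionary.
--
--     Parameters
--     ----------
--     path_prefix_tuple : tuple of str
--         Complete path to search in
--     prob_dict : dict
--         Dictionary to search for prefixes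
--
--     Returns
--     -------
--     tuple of str or None
--         Longest matching prefix, or None if no match found
--     """
--     for i in range(len(path_prefix_tuple), 0, -1):
--         sub_prefix = path_prefix_tuple[-i:]
--         if sub_prefix in prob_dict:
--             return sub_prefix
--     return None
-- ===== SOURCE B (Python) =====
-- def find_longest_prefix(path_prefix_tuple, prob_dict):
--     """Scan the dictionary keys once, keeping the longest key that is a
--     (nonempty) suffix of path_prefix_tuple."""
--     n = len(path_prefix_tuple)
--     best = None
--     for key in prob_dict:
--         k = len(key)
--         if 1 <= k <= n and path_prefix_tuple[n - k:] == key: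
--             if best is None or len(best) < k:
--                 best = key
--     return best
-- ===== Notes on version B (the rewrite author's own statement) =====
-- stated objective: faster
-- what changed: Instead of probing the dict with reconstructed suffixes from longest to shortest (each probe slices and hashes an O(n) suffix), B scans the dict's keys once and keeps the longest key that is a nonempty suffix of the input; a suffix of a given length is unique, so the longest match is identical.
import Mathlib
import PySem

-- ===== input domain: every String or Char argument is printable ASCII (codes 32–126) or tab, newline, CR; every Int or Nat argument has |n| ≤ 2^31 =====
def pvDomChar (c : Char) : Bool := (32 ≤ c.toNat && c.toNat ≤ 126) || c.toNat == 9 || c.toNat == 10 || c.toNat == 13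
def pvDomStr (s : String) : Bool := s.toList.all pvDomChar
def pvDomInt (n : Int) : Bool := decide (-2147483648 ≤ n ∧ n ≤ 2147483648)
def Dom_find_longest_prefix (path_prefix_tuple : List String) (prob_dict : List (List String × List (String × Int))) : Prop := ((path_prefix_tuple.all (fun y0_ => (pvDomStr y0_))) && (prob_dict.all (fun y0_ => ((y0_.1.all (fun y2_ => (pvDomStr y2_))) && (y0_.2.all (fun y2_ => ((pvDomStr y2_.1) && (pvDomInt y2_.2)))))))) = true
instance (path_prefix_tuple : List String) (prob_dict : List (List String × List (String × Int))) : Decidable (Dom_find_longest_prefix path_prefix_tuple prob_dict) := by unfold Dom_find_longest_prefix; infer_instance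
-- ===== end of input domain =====

-- B scans the dict's keys once keeping the longest nonempty-suffix key, instead of
-- probing with reconstructed suffixes from longest to shortest (alternative algorithm, same result).


-- ===== PORT A =====
-- loop 'for i in range(len(path), 0, -1): …' with early return
def pvA_loop (path_prefix_tuple : List String) (prob_dict : List (List String × List (String × Int))) : List Int → Option (List String)
  | [] => none
  | i :: rest =>
      let sub := PySem.List.slice path_prefix_tuple (some (-i)) none
      if prob_dict.any (fun kv => kv.1 == sub) then some sub
      else pvA_loop path_prefix_tuple prob_dict rest

def find_longest_prefix (path_prefix_tuple : List String) (prob_dict : List (List String × List (String × Int))) : Option (List String) :=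
  pvA_loop path_prefix_tuple prob_dict (PySem.List.pyRange (path_prefix_tuple.length : Int) 0 (-1))

-- ===== PORT B =====
def find_longest_prefix_alt (path_prefix_tuple : List String) (prob_dict : List (List String × List (String × Int))) : Option (List String) :=
  let n := path_prefix_tuple.length
  prob_dict.foldl (fun best kv =>
    let k := kv.1.length
    if 1 ≤ k ∧ k ≤ n ∧ PySem.List.slice path_prefix_tuple (some ((n - k : Nat) : Int)) none == kv.1 then
      match best with
      | none => some kv.1
      | some b => if b.length < k then some kv.1 else best
    else best) none

-- ===== PRECONDITION & SPEC =====
def Spec_find_longest_prefix (path_prefix_tuple : List String) (prob_dict : List (List String × List (String × Int))) (out : Option (List String)) : Prop := out = find_longest_prefix_alt path_prefix_tuple prob_dict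
instance (path_prefix_tuple : List String) (prob_dict : List (List String × List (String × Int))) (out : Option (List String)) : Decidable (Spec_find_longest_prefix path_prefix_tuple prob_dict out) := by unfold Spec_find_longest_prefix; infer_instance

-- ===== CLAIM (what is proved, stated in full; the proofs are below) =====
def Claim_equal_find_longest_prefix : Prop := ∀ (path_prefix_tuple : List String) (prob_dict : List (List String × List (String × Int))), Dom_find_longest_prefix path_prefix_tuple prob_dict → Spec_find_longest_prefix path_prefix_tuple prob_dict (find_longest_prefix path_prefix_tuple prob_dict)

-- ===== LEMMAS AND PROOFS =====

-- the suffix of length k (for k ≤ n)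
def pvSfx (path : List String) (k : Nat) : List String := path.drop (path.length - k)

-- 'suffix of length k is a key of pd'
def pvKeyIn (path : List String) (pd : List (List String × List (String × Int))) (k : Nat) : Bool :=
  pd.any (fun kv => kv.1 == pvSfx path k)

-- Nat version of A's descending search
def pvSdN (path : List String) (pd : List (List String × List (String × Int))) : Nat → Option Nat
  | 0 => none
  | k+1 => if pvKeyIn path pd (k+1) then some (k+1) else pvSdN path pd k

theorem pvSfx_length (path : List String) (k : Nat) (hk : k ≤ path.length) :
    (pvSfx path k).length = k := by
  simp [pvSfx]; omega

theorem sliceA_eq (path : List String) (i : Nat) (h1 : 1 ≤ i) (_h2 : i ≤ path.length) :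
    PySem.List.slice path (some (-(i : Int))) none = pvSfx path i := by
  rw [PySem.List.slice_from_neg_natCast path i h1]; rfl

theorem sliceB_eq (path : List String) (k : Nat) :
    PySem.List.slice path (some ((path.length - k : Nat) : Int)) none = pvSfx path k := by
  rw [PySem.List.slice_from_natCast]; rfl

-- A's loop equals the Nat descending search
theorem A_eq_sdN (path : List String) (pd : List (List String × List (String × Int))) :
    ∀ m : Nat, m ≤ path.length →
      pvA_loop path pd (PySem.List.pyRange (m : Int) 0 (-1)) = (pvSdN path pd m).map (pvSfx path) := by
  intro m
  induction m with
  | zero => intro _; rw [PySem.List.pyRange_neg_one_eq_nil (by omega)]; rfl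
  | succ k ih =>
      intro hm
      rw [PySem.List.pyRange_neg_one_cons (by push_cast; omega)]
      simp only [pvA_loop, pvSdN]
      have hs : PySem.List.slice path (some (-((k+1 : Nat) : Int))) none = pvSfx path (k+1) :=
        sliceA_eq path (k+1) (by omega) hm
      push_cast at hs ⊢
      rw [hs]
      have hnorm : ((k : Int) + 1 - 1) = (k : Int) := by ring
      cases h : pd.any (fun kv => kv.1 == pvSfx path (k+1)) with
      | true =>
          have hK : pvKeyIn path pd (k+1) = true := h
          rw [if_pos rfl, hK, if_pos rfl, Option.map_some]
      | false =>
          have hK : pvKeyIn path pd (k+1) = false := h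
          rw [if_neg (by simp), hK, if_neg (by simp), hnorm]
          exact ih (by omega)

-- list of lengths of qualifying keys
def pvL (path : List String) (pd : List (List String × List (String × Int))) : List Nat :=
  pd.filterMap (fun kv =>
    if 1 ≤ kv.1.length ∧ kv.1.length ≤ path.length ∧ pvSfx path kv.1.length = kv.1
    then some kv.1.length else none)

-- B's fold equals max of pvL, mapped through pvSfx
theorem B_fold_eq (path : List String) (l : List (List String × List (String × Int))) :
    ∀ (acc : Option Nat), (∀ j, acc = some j → 1 ≤ j ∧ j ≤ path.length) →
      l.foldl (fun best kv =>
        let k := kv.1.length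
        if 1 ≤ k ∧ k ≤ path.length ∧ PySem.List.slice path (some ((path.length - k : Nat) : Int)) none == kv.1 then
          match best with
          | none => some kv.1
          | some b => if b.length < k then some kv.1 else best
        else best) (acc.map (pvSfx path))
      = ((pvL path l).foldl (fun oj k => match oj with | none => some k | some j => some (max j k)) acc).map (pvSfx path) := by
  induction l with
  | nil => intro acc _; rfl
  | cons kv rest ih =>
      intro acc hacc
      simp only [List.foldl_cons, pvL, List.filterMap_cons]
      rw [sliceB_eq]
      by_cases hq : 1 ≤ kv.1.length ∧ kv.1.length ≤ path.length ∧ pvSfx path kv.1.length = kv.1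
      · have hb : (pvSfx path kv.1.length == kv.1) = true := by simp [hq.2.2]
        rw [if_pos hq, if_pos ⟨hq.1, hq.2.1, hb⟩]
        cases acc with
        | none =>
            have : some kv.1 = (some kv.1.length).map (pvSfx path) := by simp [hq.2.2]
            rw [Option.map_none, this, ih (some kv.1.length) (by rintro j ⟨rfl⟩; exact ⟨hq.1, hq.2.1⟩)]
            rfl
        | some j =>
            have hj := hacc j rfl
            have hjl : (pvSfx path j).length = j := pvSfx_length path j hj.2
            simp only [Option.map_some]
            have step : (if (pvSfx path j).length < kv.1.length then some kv.1 else some (pvSfx path j))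
                = (some (max j kv.1.length)).map (pvSfx path) := by
              rw [hjl]
              by_cases hlt : j < kv.1.length
              · rw [if_pos hlt, Option.map_some, Nat.max_eq_right (Nat.le_of_lt hlt), hq.2.2]
              · rw [if_neg hlt, Option.map_some, Nat.max_eq_left (Nat.le_of_not_lt hlt)]
            rw [step, ih (some (max j kv.1.length)) (by rintro x ⟨rfl⟩; constructor <;> omega)]
            rfl
      · have hb : ¬ (1 ≤ kv.1.length ∧ kv.1.length ≤ path.length ∧ (pvSfx path kv.1.length == kv.1) = true) := by
          intro ⟨h1, h2, h3⟩; exact hq ⟨h1, h2, by simpa using h3⟩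
        rw [if_neg hq, if_neg hb, ih acc hacc]
        rfl

-- membership in pvL
theorem mem_pvL (path : List String) (pd : List (List String × List (String × Int))) (k : Nat) :
    k ∈ pvL path pd ↔ 1 ≤ k ∧ k ≤ path.length ∧ pvKeyIn path pd k = true := by
  simp only [pvL, List.mem_filterMap, pvKeyIn, List.any_eq_true]
  constructor
  · rintro ⟨kv, hmem, hif⟩
    split_ifs at hif with hc
    · cases hif
      exact ⟨hc.1, hc.2.1, ⟨kv, hmem, by simp [hc.2.2]⟩⟩
  · rintro ⟨h1, h2, kv, hmem, heq⟩
    have heq' : kv.1 = pvSfx path k := by simpa using heq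
    refine ⟨kv, hmem, ?_⟩
    have hl : kv.1.length = k := by rw [heq']; exact pvSfx_length path k h2
    rw [if_pos (by rw [hl, heq']; exact ⟨h1, h2, rfl⟩), hl]

-- the max-fold is List.max?-like: characterize
def pvMaxF (l : List Nat) (acc : Option Nat) : Option Nat :=
  l.foldl (fun oj k => match oj with | none => some k | some j => some (max j k)) acc

theorem pvMaxF_none_eq_nil (l : List Nat) : pvMaxF l none = none ↔ l = [] := by
  cases l with
  | nil => simp [pvMaxF]
  | cons a t =>
      simp only [pvMaxF, List.foldl_cons]
      constructor
      · intro h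
        exfalso
        have : ∀ (t : List Nat) (j : Nat), t.foldl (fun oj k => match oj with | none => some k | some j => some (max j k)) (some j) ≠ none := by
          intro t
          induction t with
          | nil => intro j h; cases h
          | cons b t ih => intro j; simpa using ih (max j b)
        exact this t a h
      · intro h; cases h

theorem pvMaxF_some (l : List Nat) :
    ∀ (j : Nat), pvMaxF l (some j) = some (l.foldl max j) := by
  induction l with
  | nil => intro j; rfl
  | cons a t ih => intro j; simpa [pvMaxF] using ih (max j a)

theorem foldl_max_spec (t : List Nat) :
    ∀ a : Nat, (t.foldl max a = a ∨ t.foldl max a ∈ t) ∧ a ≤ t.foldl max a ∧ ∀ x ∈ t, x ≤ t.foldl max a := by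
  induction t with
  | nil => intro a; exact ⟨.inl rfl, le_refl _, by simp⟩
  | cons b t ih =>
      intro a
      obtain ⟨hmem, hle, hdom⟩ := ih (max a b)
      refine ⟨?_, le_trans (le_max_left a b) hle, ?_⟩
      · rcases hmem with h | h
        · rcases max_choice a b with hab | hab
          · exact .inl (by simpa [hab] using h)
          · exact .inr (by simp only [List.foldl_cons]; rw [h, hab]; exact List.mem_cons_self)
        · exact .inr (List.mem_cons_of_mem _ h)
      · intro x hx
        rcases List.mem_cons.mp hx with rfl | hx
        · exact le_trans (le_max_right a _) hle
        · exact hdom x hx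

theorem pvMaxF_spec (l : List Nat) (M : Nat) (h : pvMaxF l none = some M) :
    M ∈ l ∧ ∀ x ∈ l, x ≤ M := by
  cases l with
  | nil => cases h
  | cons a t =>
      simp only [pvMaxF, List.foldl_cons] at h
      rw [show t.foldl (fun oj k => match oj with | none => some k | some j => some (max j k)) (some a) = pvMaxF t (some a) from rfl, pvMaxF_some] at h
      cases h
      obtain ⟨hmem, _, hdom⟩ := foldl_max_spec t a
      constructor
      · rcases hmem with h | h
        · rw [h]; exact List.mem_cons_self
        · exact List.mem_cons_of_mem _ h
      · intro x hx
        rcases List.mem_cons.mp hx with rfl | hx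
        · exact (foldl_max_spec t _).2.1
        · exact hdom x hx

-- if no length qualifies up to m, the descending search fails
theorem sdN_none (path : List String) (pd : List (List String × List (String × Int))) :
    ∀ m : Nat, (∀ k, 1 ≤ k → k ≤ m → pvKeyIn path pd k = false) → pvSdN path pd m = none := by
  intro m
  induction m with
  | zero => intro _; rfl
  | succ k ih =>
      intro h
      simp only [pvSdN, h (k+1) (by omega) (le_refl _)]
      exact ih (fun j h1 h2 => h j h1 (by omega))

-- if M qualifies and dominates, the descending search finds it
theorem sdN_some (path : List String) (pd : List (List String × List (String × Int))) (M : Nat)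
    (hM1 : 1 ≤ M) (hMk : pvKeyIn path pd M = true) :
    ∀ m : Nat, M ≤ m → (∀ j, M < j → j ≤ m → pvKeyIn path pd j = false) →
      pvSdN path pd m = some M := by
  intro m
  induction m with
  | zero => intro h _; omega
  | succ k ih =>
      intro hle hmax
      by_cases hMe : M = k + 1
      · subst hMe; simp [pvSdN, hMk]
      · have hlt : M ≤ k := by omega
        have hf : pvKeyIn path pd (k+1) = false := hmax (k+1) (by omega) (le_refl _)
        show (if pvKeyIn path pd (k+1) = true then some (k+1) else pvSdN path pd k) = some M
        rw [hf, if_neg (by simp)]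
        exact ih hlt (fun j h1 h2 => hmax j h1 (by omega))

-- ===== VERDICT (by name: the statement is the Claim_ definition above) =====
theorem find_longest_prefix_spec : Claim_equal_find_longest_prefix := by
  intro path pd _
  unfold Spec_find_longest_prefix
  show find_longest_prefix path pd = find_longest_prefix_alt path pd
  have hA : find_longest_prefix path pd = (pvSdN path pd path.length).map (pvSfx path) := by
    unfold find_longest_prefix
    exact A_eq_sdN path pd path.length (le_refl _)
  have hB : find_longest_prefix_alt path pd = (pvMaxF (pvL path pd) none).map (pvSfx path) := by
    unfold find_longest_prefix_alt
    simpa using B_fold_eq path pd none (by intro j h; cases h)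
  rw [hA, hB]
  congr 1
  cases hM : pvMaxF (pvL path pd) none with
  | none =>
      have hnil : pvL path pd = [] := (pvMaxF_none_eq_nil _).1 hM
      apply sdN_none
      intro k h1 h2
      by_contra hc
      have : k ∈ pvL path pd := (mem_pvL path pd k).2 ⟨h1, h2, by simpa using hc⟩
      rw [hnil] at this; cases this
  | some M =>
      obtain ⟨hmem, hdom⟩ := pvMaxF_spec _ _ hM
      obtain ⟨h1, h2, hk⟩ := (mem_pvL path pd M).1 hmem
      exact sdN_some path pd M h1 hk path.length h2 (fun j hj1 hj2 => by
        by_contra hc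
        have : j ∈ pvL path pd := (mem_pvL path pd j).2 ⟨by omega, hj2, by simpa using hc⟩
        exact absurd (hdom j this) (by omega))
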